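-- pv_equiv track=rewrite | github.com/soob511/algostudy | 2023/0713/PS_디펜스게임_이길상.py | solution
-- ===== SOURCE A (Python) =====
-- import heapq
--
-- def solution(n, k, enemy):
--
--     descend = []
--     count = 0
--     answer = 0
--     for e in enemy:
--         count += e
--         heapq.heappush(descend, -e)
--
--         if n < count:
--             if k>0:
--                 k-=1
--                 count += heapq.heappop(descend)
--             else:
--                 break
--
--         answer += 1
--
--     return answer
-- ===== SOURCE B (Python) =====
-- def solution(n, k, enemy):
--     kk = max(k, 0)
--     rounds = 0
--     for r in range(1, len(enemy) + 1):
--         wave = sorted(enemy[:r], reverse=True)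
--         if sum(wave[kk:]) > n:
--             break
--         rounds = r
--     return rounds
-- ===== Notes on version B (the rewrite author's own statement) =====
-- stated objective: simpler
-- what changed: Replaces the incremental heap greedy (running total, lazy heappop of the largest wave when the budget overflows) by a direct parametric feasibility scan: round r is survivable iff the sum of the first r waves minus their max(k,0) largest is at most n, and B returns the last r before the first infeasible one; Pre_ admits every input with k <= 0 plus the problem's natural domain (n >= 0, nonnegative wave sizes), because on negative inputs with k > 0 A's eager skip-spending is path-dependent and neither behaviour is specified.
-- outside the precondition, e.g. on solution(-8, 4, [3]): A returns 1, B returns 0; on solution(0, 1, [2, -2, 6]): A returns 2, B returns 3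
import Mathlib
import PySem

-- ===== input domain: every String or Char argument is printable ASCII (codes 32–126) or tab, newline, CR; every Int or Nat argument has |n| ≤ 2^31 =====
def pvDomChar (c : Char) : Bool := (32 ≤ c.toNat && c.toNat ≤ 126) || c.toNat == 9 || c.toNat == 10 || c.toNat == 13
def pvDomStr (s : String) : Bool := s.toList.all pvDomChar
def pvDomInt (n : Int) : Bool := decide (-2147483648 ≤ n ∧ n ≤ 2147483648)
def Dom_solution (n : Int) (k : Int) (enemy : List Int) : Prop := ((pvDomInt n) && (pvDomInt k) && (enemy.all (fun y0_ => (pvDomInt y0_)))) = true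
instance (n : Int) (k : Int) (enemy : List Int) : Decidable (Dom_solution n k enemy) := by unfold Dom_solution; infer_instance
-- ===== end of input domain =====

-- B replaces A's incremental heap greedy by a per-round sorted-prefix feasibility scan (simpler, not faster).

-- ===== PORT A =====
-- heapq is modelled as an ascending sorted list: heappush = ordered insert, heappop = remove the
-- head (the minimum) — exact for heapq's observable push/pop behaviour on Int.
def heapPush (x : Int) : List Int → List Int
  | [] => [x]
  | h :: t => if x < h then x :: h :: t else h :: heapPush x t

def aGo (n : Int) (descend : List Int) (count : Int) (k : Int) (answer : Int) : List Int → Int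
  | [] => answer
  | e :: es =>
    let count1 := count + e
    let d1 := heapPush (-e) descend
    if n < count1 then
      if k > 0 then
        -- heappop: the heap is nonempty here (an element was just pushed)
        aGo n d1.tail (count1 + d1.headD 0) (k - 1) (answer + 1) es
      else answer
    else aGo n d1 count1 k (answer + 1) es

def solution (n : Int) (k : Int) (enemy : List Int) : Int :=
  aGo n [] 0 k 0 enemy

-- ===== PORT B =====
def altGo (n : Int) (kk : Int) (enemy : List Int) (rounds : Int) : List Int → Int
  | [] => rounds
  | r :: rs =>
    let wave := PySem.List.sorted (PySem.List.slice enemy none (some r)) (fun x => x) true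
    if (PySem.List.slice wave (some kk) none).sum > n then rounds
    else altGo n kk enemy r rs

def solution_alt (n : Int) (k : Int) (enemy : List Int) : Int :=
  let kk := max k 0
  altGo n kk enemy 0 (PySem.List.pyRange 1 ((enemy.length : Int) + 1) 1)

-- ===== PRECONDITION & SPEC =====
-- Pre_ admits every input with k ≤ 0 (no skip is ever spent, where A and B agree on all
-- integers) and otherwise restricts to the problem's natural domain (n ≥ 0 and nonnegative
-- wave sizes, as the defense-game statement guarantees): on negative inputs with k > 0 A's
-- eager skip-spending greedy is path-dependent and A and B legitimately differ there.
def Pre_solution (n : Int) (k : Int) (enemy : List Int) : Prop :=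
  k ≤ 0 ∨ (0 ≤ n ∧ ∀ e ∈ enemy, 0 ≤ e)
instance (n : Int) (k : Int) (enemy : List Int) : Decidable (Pre_solution n k enemy) := by
  unfold Pre_solution; infer_instance

def pvWitness_solution : Int × Int × List Int := (10, 1, [4, 2, 4, 8, 3, 3])

def Spec_solution (n : Int) (k : Int) (enemy : List Int) (out : Int) : Prop := out = solution_alt n k enemy
instance (n : Int) (k : Int) (enemy : List Int) (out : Int) : Decidable (Spec_solution n k enemy out) := by unfold Spec_solution; infer_instance

-- ===== CLAIM (what is proved, stated in full; the proofs are below) =====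
def Claim_equal_solution : Prop := ∀ (n : Int) (k : Int) (enemy : List Int), Dom_solution n k enemy → Pre_solution n k enemy → Spec_solution n k enemy (solution n k enemy)

-- ===== LEMMAS AND PROOFS =====

-- descending insertion sort used as the common description of both loop states
def insertD (x : Int) : List Int → List Int
  | [] => [x]
  | h :: t => if h < x then x :: h :: t else h :: insertD x t

def sortD (xs : List Int) : List Int := xs.foldl (fun acc x => insertD x acc) []

lemma insertD_perm (x : Int) (l : List Int) : (insertD x l).Perm (x :: l) := by
  induction l with
  | nil => simp [insertD]
  | cons h t ih =>
    by_cases hc : h < x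
    · simp [insertD, hc]
    · simp only [insertD, if_neg hc]
      exact (ih.cons h).trans (List.Perm.swap x h t)

lemma sum_insertD (x : Int) (l : List Int) : (insertD x l).sum = x + l.sum :=
  by simpa using (insertD_perm x l).sum_eq

lemma mem_insertD {y x : Int} {l : List Int} : y ∈ insertD x l ↔ y = x ∨ y ∈ l := by
  constructor
  · intro h; simpa using (insertD_perm x l).mem_iff.mp h
  · intro h; exact (insertD_perm x l).mem_iff.mpr (by simpa using h)

lemma insertD_ne_nil (x : Int) (l : List Int) : insertD x l ≠ [] := by
  have := (insertD_perm x l).length_eq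
  intro h; simp [h] at this

lemma pairwise_insertD (x : Int) (l : List Int)
    (h : l.Pairwise (fun a b => b ≤ a)) : (insertD x l).Pairwise (fun a b => b ≤ a) := by
  induction l with
  | nil => simp [insertD]
  | cons a t ih =>
    rcases List.pairwise_cons.mp h with ⟨ha, ht⟩
    by_cases hc : a < x
    · simp only [insertD, if_pos hc]
      refine List.pairwise_cons.mpr ⟨?_, h⟩
      intro b hb
      rcases List.mem_cons.mp hb with rfl | hb
      · exact le_of_lt hc
      · exact le_trans (ha b hb) (le_of_lt hc)
    · simp only [insertD, if_neg hc]
      refine List.pairwise_cons.mpr ⟨?_, ih ht⟩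
      intro b hb
      rcases mem_insertD.mp hb with rfl | hb
      · exact le_of_not_gt hc
      · exact ha b hb

lemma sortD_perm (xs : List Int) : (sortD xs).Perm xs := by
  suffices h : ∀ (xs acc : List Int),
      (xs.foldl (fun a x => insertD x a) acc).Perm (acc ++ xs) by
    simpa using h xs []
  intro xs
  induction xs with
  | nil => intro acc; simp
  | cons x t ih =>
    intro acc
    simp only [List.foldl_cons]
    refine (ih (insertD x acc)).trans ?_
    have h1 : (insertD x acc ++ t).Perm ((x :: acc) ++ t) :=
      (insertD_perm x acc).append_right t
    refine h1.trans ?_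
    simpa using (List.perm_middle (a := x) (l₁ := acc) (l₂ := t)).symm

lemma sortD_pairwise (xs : List Int) : (sortD xs).Pairwise (fun a b => b ≤ a) := by
  suffices h : ∀ (xs acc : List Int), acc.Pairwise (fun a b => b ≤ a) →
      (xs.foldl (fun a x => insertD x a) acc).Pairwise (fun a b => b ≤ a) by
    exact h xs [] (by simp)
  intro xs
  induction xs with
  | nil => intro acc hacc; simpa using hacc
  | cons x t ih =>
    intro acc hacc
    simp only [List.foldl_cons]
    exact ih (insertD x acc) (pairwise_insertD x acc hacc)

lemma sortD_append_singleton (p : List Int) (e : Int) :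
    sortD (p ++ [e]) = insertD e (sortD p) := by
  simp [sortD, List.foldl_append]

lemma pySorted_eq_sortD (xs : List Int) :
    PySem.List.sorted xs (fun x => x) true = sortD xs := by
  have hp := (PySem.List.sorted_perm xs (fun x => x) true).trans (sortD_perm xs).symm
  exact hp.eq_of_pairwise (fun a b _ _ h1 h2 => by omega)
    (PySem.List.sorted_pairwise_rev xs (fun x => x)) (sortD_pairwise xs)

lemma heapPush_map_neg (e : Int) (l : List Int) :
    heapPush (-e) (l.map (fun a => -a)) = (insertD e l).map (fun a => -a) := by
  induction l with
  | nil => simp [heapPush, insertD]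
  | cons h t ih =>
    by_cases hc : h < e
    · have : -e < -h := by omega
      simp [heapPush, insertD, hc, this]
    · have : ¬ (-e < -h) := by omega
      simp [heapPush, insertD, hc, this, ih]

-- insertion with e below the first j elements
lemma insertD_of_le (e : Int) : ∀ (j : Nat) (l : List Int),
    (∀ x ∈ l.take j, e ≤ x) → insertD e l = l.take j ++ insertD e (l.drop j) := by
  intro j
  induction j with
  | zero => intro l _; simp
  | succ jn ih =>
    intro l hle
    cases l with
    | nil => simp
    | cons h t =>
      have hh : e ≤ h := hle h (by simp)
      have : ¬ h < e := by omega
      simp only [insertD, if_neg this, List.take_succ_cons, List.drop_succ_cons,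
        List.cons_append, List.cons.injEq, true_and]
      exact ih t (fun x hx => hle x (by simp [hx]))

lemma drop_insertD_of_le (e : Int) (j : Nat) (l : List Int) (hj : j ≤ l.length)
    (h : ∀ x ∈ l.take j, e ≤ x) :
    (insertD e l).drop j = insertD e (l.drop j) := by
  rw [insertD_of_le e j l h, List.drop_append_of_le_length (by simp [hj])]
  simp

lemma take_insertD_of_le (e : Int) (j : Nat) (l : List Int) (hj : j ≤ l.length)
    (h : ∀ x ∈ l.take j, e ≤ x) :
    (insertD e l).take j = l.take j := by
  rw [insertD_of_le e j l h, List.take_append_of_le_length (by simp [hj])]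
  simp [List.take_take]

-- insertion with e above some of the first j elements
lemma drop_insertD_of_lt (e : Int) : ∀ (l : List Int) (j : Nat),
    (∃ x ∈ l.take j, x < e) → (insertD e l).drop j = l.drop (j - 1) := by
  intro l
  induction l with
  | nil => intro j h; simp at h
  | cons h t ih =>
    intro j hx
    cases j with
    | zero => simp at hx
    | succ jn =>
      by_cases hc : h < e
      · simp [insertD, hc]
      · rcases hx with ⟨x, hxm, hxe⟩
        have hne : x ≠ h := by intro he; omega
        have hxt : x ∈ t.take jn := by
          rcases List.mem_cons.mp (by simpa using hxm) with he | ht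
          · exact absurd he hne
          · exact ht
        have hjn : jn ≠ 0 := by rintro rfl; simp at hxt
        simp only [insertD, if_neg hc, List.drop_succ_cons]
        rw [ih jn ⟨x, hxt, hxe⟩]
        obtain ⟨jm, rfl⟩ := Nat.exists_eq_succ_of_ne_zero hjn
        simp

lemma mem_take_insertD_of_lt (e : Int) : ∀ (l : List Int) (j : Nat) (y : Int),
    (∃ x ∈ l.take j, x < e) → y ∈ (insertD e l).take (j + 1) → y = e ∨ y ∈ l.take j := by
  intro l
  induction l with
  | nil => intro j y h; simp at h
  | cons h t ih =>
    intro j y hx hy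
    cases j with
    | zero => simp at hx
    | succ jn =>
      by_cases hc : h < e
      · simp only [insertD, if_pos hc, List.take_succ_cons] at hy
        rcases List.mem_cons.mp hy with rfl | hy2
        · exact Or.inl rfl
        · exact Or.inr hy2
      · rcases hx with ⟨x, hxm, hxe⟩
        have hne : x ≠ h := by intro he; omega
        have hxt : x ∈ t.take jn := by
          rcases List.mem_cons.mp (by simpa using hxm) with he | ht
          · exact absurd he hne
          · exact ht
        simp only [insertD, if_neg hc, List.take_succ_cons] at hy
        rcases List.mem_cons.mp hy with rfl | hy2
        · exact Or.inr (by simp)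
        · rcases ih jn y ⟨x, hxt, hxe⟩ hy2 with he | hm
          · exact Or.inl he
          · exact Or.inr (by simp [hm])

lemma pairwise_take_drop {l : List Int} (h : l.Pairwise (fun a b => b ≤ a)) (j : Nat) :
    ∀ x ∈ l.take j, ∀ y ∈ l.drop j, y ≤ x := by
  have h2 : (l.take j ++ l.drop j).Pairwise (fun a b => b ≤ a) := by
    rw [List.take_append_drop]; exact h
  exact (List.pairwise_append.mp h2).2.2

lemma sum_drop_le (l : List Int) (h : ∀ x ∈ l, 0 ≤ x) (m : Nat) :
    (l.drop m).sum ≤ l.sum := by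
  induction l generalizing m with
  | nil => simp
  | cons a t ih =>
    cases m with
    | zero => simp
    | succ mn =>
      have h0 : 0 ≤ a := h a (by simp)
      have := ih (fun x hx => h x (by simp [hx])) mn
      simp only [List.drop_succ_cons, List.sum_cons]
      omega

lemma sum_drop_mono (l : List Int) (h : ∀ x ∈ l, 0 ≤ x) {j j' : Nat} (hj : j ≤ j') :
    (l.drop j').sum ≤ (l.drop j).sum := by
  have : l.drop j' = (l.drop j).drop (j' - j) := by
    rw [List.drop_drop]; congr 1; omega
  rw [this]
  exact sum_drop_le (l.drop j) (fun x hx => h x (List.mem_of_mem_drop hx)) _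

-- ===== MAIN INVARIANT =====
lemma mem_take_succ_of_mem_take {x : Int} {l : List Int} {j : Nat}
    (h : x ∈ l.take j) : x ∈ l.take (j + 1) := by
  have heq : l.take j = (l.take (j + 1)).take j := by
    rw [List.take_take]; congr 1; omega
  rw [heq] at h
  exact List.take_subset _ _ h

lemma aGo_eq_altGo (n k : Int) :
    ∀ (es p : List Int) (j : Nat),
      (∀ e ∈ p ++ es, 0 ≤ e) →
      (j : Int) ≤ max k 0 →
      j ≤ p.length →
      ((sortD p).drop j).sum ≤ n →
      (∀ x ∈ (sortD p).take j, n < ((sortD p).drop j).sum + x) →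
      aGo n (((sortD p).drop j).map (fun a => -a)) (((sortD p).drop j).sum)
        (k - j) (p.length) es
        = altGo n (max k 0) (p ++ es) (p.length)
            (PySem.List.pyRange ((p.length : Int) + 1) (((p ++ es).length : Int) + 1) 1) := by
  intro es
  induction es with
  | nil =>
    intro p j _ _ _ _ _
    simp only [List.append_nil]
    rw [PySem.List.pyRange_one_eq_nil (by omega)]
    simp [aGo, altGo]
  | cons e es ih =>
    intro p j hpos hjk hjp h5 h4
    have he0 : (0:Int) ≤ e := hpos e (by simp)
    have hlen : (sortD p).length = p.length := (sortD_perm p).length_eq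
    have hpw := sortD_pairwise p
    have hmeml : ∀ x ∈ sortD p, (0:Int) ≤ x := fun x hx =>
      hpos x (List.mem_append_left _ ((sortD_perm p).subset hx))
    set l := sortD p with hldef
    set R := l.drop j with hRdef
    set c := R.sum with hcdef
    set L := p.length with hLdef
    set l' := insertD e l with hl'def
    have hRpw : R.Pairwise (fun a b => b ≤ a) := hpw.sublist (List.drop_sublist j l)
    have hl'pw : l'.Pairwise (fun a b => b ≤ a) := pairwise_insertD e l hpw
    have hmem' : ∀ x ∈ l', (0:Int) ≤ x := by
      intro x hx
      rcases mem_insertD.mp hx with rfl | hx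
      · exact he0
      · exact hmeml x hx
    have hjkk : j ≤ (max k 0).toNat := by omega
    have hTlen : (((p ++ e :: es).length : Int)) = (L : Int) + 1 + es.length := by
      simp [List.length_append]; ring
    have hrange : PySem.List.pyRange ((L : Int) + 1) (((p ++ e :: es).length : Int) + 1) 1
        = ((L : Int) + 1) :: PySem.List.pyRange ((L : Int) + 2) (((p ++ e :: es).length : Int) + 1) 1 := by
      rw [PySem.List.pyRange_one_cons (by rw [hTlen]; omega)]
      congr 1
    have hslice : PySem.List.slice (p ++ e :: es) none (some ((L : Int) + 1)) = p ++ [e] := by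
      rw [PySem.List.slice_to _ (by omega)]
      have h1 : ((L : Int) + 1).toNat = L + 1 := by omega
      rw [h1, List.take_append]
      simp [hLdef]
    have hwave : PySem.List.sorted (PySem.List.slice (p ++ e :: es) none (some ((L : Int) + 1)))
        (fun x => x) true = l' := by
      rw [hslice, pySorted_eq_sortD, sortD_append_singleton, ← hldef, ← hl'def]
    have hkslice : ∀ (w : List Int), PySem.List.slice w (some (max k 0)) none = w.drop (max k 0).toNat :=
      fun w => PySem.List.slice_from w (le_max_right k 0)
    have hsortp' : sortD (p ++ [e]) = l' := by
      rw [sortD_append_singleton, ← hldef, ← hl'def]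
    have hBstep : altGo n (max k 0) (p ++ e :: es) (L : Int)
        (PySem.List.pyRange ((L : Int) + 1) (((p ++ e :: es).length : Int) + 1) 1)
        = if (l'.drop (max k 0).toNat).sum > n then (L : Int)
          else altGo n (max k 0) (p ++ e :: es) ((L : Int) + 1)
            (PySem.List.pyRange ((L : Int) + 2) (((p ++ e :: es).length : Int) + 1) 1) := by
      rw [hrange]
      simp only [altGo, hwave, hkslice]
    have hAstep : aGo n (R.map (fun a => -a)) c (k - j) (L : Int) (e :: es)
        = if n < c + e then
            (if k - (j:Int) > 0 then
              aGo n ((heapPush (-e) (R.map (fun a => -a))).tail)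
                (c + e + (heapPush (-e) (R.map (fun a => -a))).headD 0) (k - j - 1) ((L : Int) + 1) es
            else (L : Int))
          else aGo n (heapPush (-e) (R.map (fun a => -a))) (c + e) (k - j) ((L : Int) + 1) es := by
      simp only [aGo]
    rw [hAstep, hBstep, heapPush_map_neg]
    have hppos : ∀ x ∈ (p ++ [e]) ++ es, (0:Int) ≤ x := by
      intro x hx; apply hpos; simpa [List.append_assoc] using hx
    have hassoc : (p ++ [e]) ++ es = p ++ e :: es := by simp
    by_cases hcmp : n < c + e
    · -- the wave overflows the budget
      rcases hx : insertD e R with _ | ⟨m0, tl⟩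
      · exact absurd hx (insertD_ne_nil e R)
      have hsum_me : m0 + tl.sum = c + e := by
        have := sum_insertD e R
        rw [hx] at this
        simp at this
        omega
      have hm0ge : e ≤ m0 := by
        have hpw2 : (insertD e R).Pairwise (fun a b => b ≤ a) := pairwise_insertD e R hRpw
        rw [hx] at hpw2
        have hme : e ∈ insertD e R := mem_insertD.mpr (Or.inl rfl)
        rw [hx] at hme
        rcases List.mem_cons.mp hme with he | hme
        · omega
        · exact (List.pairwise_cons.mp hpw2).1 e hme
      by_cases hall : ∀ x ∈ l.take j, e ≤ x
      · -- e is not above any of the j currently-skipped waves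
        have hdropj : l'.drop j = m0 :: tl := by
          rw [hl'def, drop_insertD_of_le e j l (by omega) hall, ← hRdef, hx]
        have hdropj1 : l'.drop (j + 1) = tl := by
          rw [← List.tail_drop, hdropj]
          rfl
        have hm0mem : m0 ∈ l'.drop j := by rw [hdropj]; simp
        have hI4' : ∀ x ∈ l'.take (j + 1), n < tl.sum + x := by
          intro x hxm
          have hx2 : x ∈ l'.take j ∨ x ∈ List.take 1 (l'.drop j) := by
            have ht := List.take_add (l := l') (i := j) (j := 1)
            rw [ht] at hxm
            exact List.mem_append.mp hxm
          have hxge : m0 ≤ x := by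
            rcases hx2 with hx2 | hx2
            · exact pairwise_take_drop hl'pw j x hx2 m0 hm0mem
            · rw [hdropj] at hx2; simp at hx2; omega
          omega
        by_cases hk : k - (j:Int) > 0
        · rw [if_pos hcmp, if_pos hk]
          have hj1kk : j + 1 ≤ (max k 0).toNat := by omega
          have hBcond : ¬ (l'.drop (max k 0).toNat).sum > n := by
            have h1 : (l'.drop (max k 0).toNat).sum ≤ (l'.drop (j+1)).sum :=
              sum_drop_mono l' hmem' hj1kk
            rw [hdropj1] at h1
            omega
          rw [if_neg hBcond]
          have := ih (p ++ [e]) (j + 1) hppos (by push_cast; omega)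
            (by simp [List.length_append]; omega)
            (by rw [hsortp', hdropj1]; omega)
            (by rw [hsortp', hdropj1]; exact hI4')
          rw [hsortp', hdropj1, hassoc] at this
          have hL1 : ((p ++ [e]).length : Int) = (L : Int) + 1 := by
            simp [List.length_append, hLdef]
          rw [hL1] at this
          push_cast at this
          simp only [List.map_cons, List.tail_cons, List.headD_cons]
          have harg1 : c + e + -m0 = tl.sum := by omega
          have harg2 : k - (j:Int) - 1 = k - ((j:Int) + 1) := by ring
          have hL2 : ((L:Int) + 1) + 1 = (L:Int) + 2 := by ring
          rw [hL2] at this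
          rw [harg1, harg2]
          exact this
        · rw [if_pos hcmp, if_neg hk]
          have hkkj : (max k 0).toNat = j := by omega
          have hBcond : (l'.drop (max k 0).toNat).sum > n := by
            rw [hkkj, hdropj]
            simp
            omega
          rw [if_pos hBcond]
      · -- e is above one of the j currently-skipped waves
        rw [not_forall] at hall
        simp only [not_forall, exists_prop, not_le] at hall
        rcases hall with ⟨x0, hx0m, hx0lt⟩
        have hj0 : j ≠ 0 := by rintro rfl; simp at hx0m
        have hins : insertD e R = e :: R := by
          rcases hR : R with _ | ⟨rh, rt⟩
          · simp [insertD]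
          · have hrh : rh ≤ x0 := by
              apply pairwise_take_drop hpw j x0 hx0m
              rw [← hRdef, hR]; simp
            have hlt : rh < e := by omega
            simp [insertD, hlt]
        have hm0e : m0 = e := by
          rw [hins] at hx
          exact ((List.cons.injEq _ _ _ _).mp hx).1.symm
        have htle : tl = R := by
          rw [hins] at hx
          exact ((List.cons.injEq _ _ _ _).mp hx).2.symm
        have hdropj1 : l'.drop (j + 1) = R := by
          rw [hl'def, drop_insertD_of_lt e l (j+1)
            ⟨x0, mem_take_succ_of_mem_take hx0m, hx0lt⟩]
          simp [hRdef]
        have hI4' : ∀ x ∈ l'.take (j + 1), n < tl.sum + x := by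
          intro x hxm
          rcases mem_take_insertD_of_lt e l j x ⟨x0, hx0m, hx0lt⟩ hxm with rfl | hxm2
          · rw [htle]; omega
          · rw [htle]; exact h4 x hxm2
        by_cases hk : k - (j:Int) > 0
        · rw [if_pos hcmp, if_pos hk]
          have hj1kk : j + 1 ≤ (max k 0).toNat := by omega
          have hBcond : ¬ (l'.drop (max k 0).toNat).sum > n := by
            have h1 : (l'.drop (max k 0).toNat).sum ≤ (l'.drop (j+1)).sum :=
              sum_drop_mono l' hmem' hj1kk
            rw [hdropj1] at h1
            omega
          rw [if_neg hBcond]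
          have := ih (p ++ [e]) (j + 1) hppos (by push_cast; omega)
            (by simp [List.length_append]; omega)
            (by rw [hsortp', hdropj1]; omega)
            (by rw [hsortp', hdropj1, ← htle]; exact hI4')
          rw [hsortp', hdropj1, hassoc] at this
          have hL1 : ((p ++ [e]).length : Int) = (L : Int) + 1 := by
            simp [List.length_append, hLdef]
          rw [hL1] at this
          push_cast at this
          simp only [List.map_cons, List.tail_cons, List.headD_cons]
          have harg1 : c + e + -m0 = tl.sum := by omega
          have harg2 : k - (j:Int) - 1 = k - ((j:Int) + 1) := by ring
          have hL2 : ((L:Int) + 1) + 1 = (L:Int) + 2 := by ring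
          rw [hL2] at this
          rw [harg1, harg2, htle]
          exact this
        · rw [if_pos hcmp, if_neg hk]
          have hkkj : (max k 0).toNat = j := by omega
          have hj1len : j - 1 < l.length := by omega
          have hdropjl' : l'.drop j = l.drop (j - 1) :=
            drop_insertD_of_lt e l j ⟨x0, hx0m, hx0lt⟩
          have hj1 : (j - 1) + 1 = j := by omega
          have hdrop_pred : l.drop (j - 1) = l[j-1]'(by omega) :: l.drop j := by
            rw [List.drop_eq_getElem_cons hj1len, hj1]
          have hgmem : l[j-1]'(by omega) ∈ l.take j := by
            have h1 : j - 1 < (l.take j).length := by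
              simp [List.length_take]
              omega
            have h2 : (l.take j)[j-1]'h1 = l[j-1]'(by omega) := List.getElem_take
            rw [← h2]
            exact List.getElem_mem h1
          have hBcond : (l'.drop (max k 0).toNat).sum > n := by
            rw [hkkj, hdropjl', hdrop_pred]
            have := h4 (l[j-1]'(by omega)) hgmem
            simp only [List.sum_cons, ← hRdef, ← hcdef]
            omega
          rw [if_pos hBcond]
    · -- budget not exceeded: both sides advance with the same skip count
      have hall : ∀ x ∈ l.take j, e ≤ x := by
        intro x hxm
        have := h4 x hxm
        omega
      have hdropj : l'.drop j = insertD e R := by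
        rw [hl'def, drop_insertD_of_le e j l (by omega) hall, hRdef]
      have htakej : l'.take j = l.take j :=
        take_insertD_of_le e j l (by omega) hall
      have hsum' : (l'.drop j).sum = c + e := by
        rw [hdropj, sum_insertD]; omega
      rw [if_neg hcmp]
      have hBcond : ¬ (l'.drop (max k 0).toNat).sum > n := by
        have h1 : (l'.drop (max k 0).toNat).sum ≤ (l'.drop j).sum :=
          sum_drop_mono l' hmem' hjkk
        rw [hsum'] at h1
        omega
      rw [if_neg hBcond]
      have := ih (p ++ [e]) j hppos hjk
        (by simp [List.length_append]; omega)
        (by rw [hsortp', hsum']; omega)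
        (by
          rw [hsortp', hsum', htakej]
          intro x hxm
          have := h4 x hxm
          omega)
      rw [hsortp', hsum', hdropj, hassoc] at this
      have hL1 : ((p ++ [e]).length : Int) = (L : Int) + 1 := by
        simp [List.length_append, hLdef]
      rw [hL1] at this
      have hL2 : ((L:Int) + 1) + 1 = (L:Int) + 2 := by ring
      rw [hL2] at this
      exact this

-- with k ≤ 0 A never pops: both sides stop at the first prefix whose plain sum exceeds n
lemma aGo_eq_altGo_nopop (n k : Int) (hk : k ≤ 0) :
    ∀ (es p : List Int) (d : List Int),
      aGo n d p.sum k (p.length) es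
        = altGo n (max k 0) (p ++ es) (p.length)
            (PySem.List.pyRange ((p.length : Int) + 1) (((p ++ es).length : Int) + 1) 1) := by
  intro es
  induction es with
  | nil =>
    intro p d
    simp only [List.append_nil]
    rw [PySem.List.pyRange_one_eq_nil (by omega)]
    simp [aGo, altGo]
  | cons e es ih =>
    intro p d
    have hmax : max k 0 = 0 := by omega
    have hTlen : (((p ++ e :: es).length : Int)) = (p.length : Int) + 1 + es.length := by
      simp [List.length_append]; ring
    have hrange : PySem.List.pyRange ((p.length : Int) + 1) (((p ++ e :: es).length : Int) + 1) 1
        = ((p.length : Int) + 1)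
            :: PySem.List.pyRange ((p.length : Int) + 2) (((p ++ e :: es).length : Int) + 1) 1 := by
      rw [PySem.List.pyRange_one_cons (by rw [hTlen]; omega)]
      congr 1
    have hslice : PySem.List.slice (p ++ e :: es) none (some ((p.length : Int) + 1)) = p ++ [e] := by
      rw [PySem.List.slice_to _ (by omega)]
      have h1 : ((p.length : Int) + 1).toNat = p.length + 1 := by omega
      rw [h1, List.take_append]
      simp
    have hwavesum : (PySem.List.sorted (PySem.List.slice (p ++ e :: es) none
        (some ((p.length : Int) + 1))) (fun x => x) true).sum = p.sum + e := by
      rw [hslice]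
      have := (PySem.List.sorted_perm (p ++ [e]) (fun x => x) true).sum_eq
      simpa using this
    rw [hrange]
    simp only [aGo, altGo, hmax,
      PySem.List.slice_zero_start, PySem.List.slice_none_none, hwavesum]
    by_cases hcmp : n < p.sum + e
    · rw [if_pos hcmp, if_neg (by omega : ¬ k > 0), if_pos (by omega : p.sum + e > n)]
    · rw [if_neg hcmp, if_neg (by omega : ¬ p.sum + e > n)]
      have := ih (p ++ [e]) (heapPush (-e) d)
      have hL1 : ((p ++ [e]).length : Int) = (p.length : Int) + 1 := by
        simp [List.length_append]
      have hL2 : ((p.length : Int) + 1) + 1 = (p.length : Int) + 2 := by ring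
      rw [hL1, hL2, hmax, List.append_assoc, List.singleton_append,
        List.sum_append, List.sum_cons, List.sum_nil, List.length_append] at this
      simp only [add_zero] at this
      push_cast at this
      have hT2 : (((p ++ e :: es).length : Int)) = (p.length : Int) + ((e :: es).length : Int) := by
        simp [List.length_append]
      rw [hT2]
      convert this using 2

-- ===== VERDICT (by name: the statement is the Claim_ definition above) =====
theorem solution_spec : Claim_equal_solution := by
  intro n k enemy _ hpre
  unfold Spec_solution
  unfold solution solution_alt
  rcases hpre with hk | ⟨hn, hpos⟩
  · have h := aGo_eq_altGo_nopop n k hk enemy [] []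
    simp only [List.sum_nil, List.length_nil, List.nil_append, Nat.cast_zero] at h
    simpa using h
  · have h := aGo_eq_altGo n k enemy [] 0 (by simpa using hpos)
      (by simp) (by simp) (by simp [sortD]; exact hn) (by simp [sortD])
    simp only [sortD, List.foldl_nil, List.drop_nil, List.map_nil, List.sum_nil,
      List.length_nil, List.nil_append, Nat.cast_zero, Int.sub_zero] at h
    simpa using h
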